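-- pv_equiv track=rewrite | github.com/dagoaty/AdventofCode2021 | day4/day4.py | getLosingCard
-- ===== SOURCE A (Python) =====
-- from typing import List, Tuple, Set
--
-- def getNumPos(num: int, callLine: List[int]) -> int:
--     pos: int = 0
--     for call in callLine:
--         if call == num:
--             return pos
--         pos += 1
--     return pos
--
-- def getCardWinningPos(card: List[List[int]], callLine: List[int]) -> int:
--     cardWinPos: int = len(callLine)
--     for line in card:
--         lineWinPos: int = 0
--         for num in line:
--             numPos = getNumPos(num, callLine)
--             if numPos > lineWinPos:
--                 lineWinPos = numPos
--         if lineWinPos < cardWinPos: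
--             cardWinPos = lineWinPos
--     return cardWinPos
--
-- def getLosingCard(cards: List[List[List[int]]], callLine: List[int]) -> Tuple[int, int]:
--     loseCard: int = len(cards)
--     cardNum: int = 0
--     winPos: int = 0
--     for card in cards:
--         cardWinPos = getCardWinningPos(card, callLine)
--         if cardWinPos > winPos:
--             loseCard = cardNum
--             winPos = cardWinPos
--         cardNum += 1
--     return loseCard, winPos
-- ===== SOURCE B (Python) =====
-- def _rowWinPos(row, callLine):
--     # chronological simulation: shrink the list of still-unmarked numbers call by call
--     need = list(row)
--     if not need:
--         return 0
--     i = 0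
--     for call in callLine:
--         need = [n for n in need if n != call]
--         if not need:
--             return i
--         i += 1
--     return i
--
-- def getLosingCard(cards, callLine):
--     loseCard = len(cards)
--     winPos = 0
--     for cardNum, card in enumerate(cards):
--         cardWin = len(callLine)
--         for row in card:
--             r = _rowWinPos(row, callLine)
--             if r < cardWin:
--                 cardWin = r
--         if cardWin > winPos:
--             loseCard = cardNum
--             winPos = cardWin
--     return loseCard, winPos
-- ===== Notes on version B (the rewrite author's own statement) =====
-- stated objective: alternative
-- what changed: B computes each row's win position by simulating the calls chronologically over a shrinking list of still-unmarked numbers (returning the call index at which the row empties, with len(callLine) if it never does), instead of A's per-number positional lookups via getNumPos scans.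
import Mathlib
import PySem

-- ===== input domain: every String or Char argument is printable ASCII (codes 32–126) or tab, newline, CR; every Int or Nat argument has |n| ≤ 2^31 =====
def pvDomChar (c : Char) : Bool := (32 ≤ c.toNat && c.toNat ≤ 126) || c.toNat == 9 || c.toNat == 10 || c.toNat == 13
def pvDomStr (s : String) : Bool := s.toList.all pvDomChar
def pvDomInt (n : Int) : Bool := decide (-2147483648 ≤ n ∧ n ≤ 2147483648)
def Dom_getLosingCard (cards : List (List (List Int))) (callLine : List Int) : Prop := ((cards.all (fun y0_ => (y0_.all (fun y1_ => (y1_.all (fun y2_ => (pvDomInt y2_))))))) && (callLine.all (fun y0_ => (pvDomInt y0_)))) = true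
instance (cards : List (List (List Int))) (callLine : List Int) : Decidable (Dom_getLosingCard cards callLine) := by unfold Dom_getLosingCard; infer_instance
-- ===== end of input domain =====

-- B replaces A's per-number positional lookups (getNumPos scans) by a chronological
-- simulation of the calls over a shrinking list of unmarked numbers per row (objective: alternative).

-- ===== PORT A =====
-- getNumPos's loop with its pos counter
def getNumPosGo (num : Int) (calls : List Int) (pos : Int) : Int :=
  match calls with
  | [] => pos
  | c :: cs => if c = num then pos else getNumPosGo num cs (pos + 1)

def getNumPos (num : Int) (callLine : List Int) : Int :=
  getNumPosGo num callLine 0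

def getCardWinningPos (card : List (List Int)) (callLine : List Int) : Int :=
  card.foldl (fun cardWinPos line =>
    let lineWinPos := line.foldl (fun l num =>
      let numPos := getNumPos num callLine
      if numPos > l then numPos else l) 0
    if lineWinPos < cardWinPos then lineWinPos else cardWinPos) (callLine.length : Int)

def getLosingCard (cards : List (List (List Int))) (callLine : List Int) : Int × Int :=
  let res := cards.foldl (fun (st : Int × Int × Int) card =>
    let cardWinPos := getCardWinningPos card callLine
    if cardWinPos > st.2.2 then (st.2.1, st.2.1 + 1, cardWinPos)
    else (st.1, st.2.1 + 1, st.2.2)) ((cards.length : Int), 0, 0)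
  (res.1, res.2.2)

-- ===== PORT B =====
-- _rowWinPos's loop: filter the need list by each call in order, counter i
def rowWinGo (need : List Int) (calls : List Int) (i : Int) : Int :=
  match calls with
  | [] => i
  | c :: cs =>
    let need' := need.filter (fun n => n != c)
    if need' = [] then i else rowWinGo need' cs (i + 1)

def rowWinPos (row : List Int) (callLine : List Int) : Int :=
  if row = [] then 0 else rowWinGo row callLine 0

def getLosingCard_alt (cards : List (List (List Int))) (callLine : List Int) : Int × Int :=
  let res := cards.foldl (fun (st : Int × Int × Int) card =>
    let cardWin := card.foldl (fun cw row =>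
      let r := rowWinPos row callLine
      if r < cw then r else cw) (callLine.length : Int)
    if cardWin > st.2.2 then (st.2.1, st.2.1 + 1, cardWin)
    else (st.1, st.2.1 + 1, st.2.2)) ((cards.length : Int), 0, 0)
  (res.1, res.2.2)

-- ===== PRECONDITION & SPEC =====
def Spec_getLosingCard (cards : List (List (List Int))) (callLine : List Int) (out : Int × Int) : Prop := out = getLosingCard_alt cards callLine
instance (cards : List (List (List Int))) (callLine : List Int) (out : Int × Int) : Decidable (Spec_getLosingCard cards callLine out) := by unfold Spec_getLosingCard; infer_instance

-- ===== CLAIM (what is proved, stated in full; the proofs are below) =====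
def Claim_equal_getLosingCard : Prop := ∀ (cards : List (List (List Int))) (callLine : List Int), Dom_getLosingCard cards callLine → Spec_getLosingCard cards callLine (getLosingCard cards callLine)

-- ===== LEMMAS AND PROOFS =====

-- max over a row of the rows' numbers' call positions, starting from 0 (A's inner loop, abstractly)
def maxG (l cs : List Int) : Int := l.foldl (fun a n => max a (getNumPos n cs)) 0

theorem getNumPosGo_shift (num : Int) : ∀ (cs : List Int) (pos : Int),
    getNumPosGo num cs pos = pos + getNumPosGo num cs 0 := by
  intro cs
  induction cs with
  | nil => intro pos; simp [getNumPosGo]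
  | cons c t ih =>
    intro pos
    simp only [getNumPosGo]
    by_cases h : c = num
    · simp [h]
    · simp only [if_neg h]
      rw [ih (pos + 1), ih (0 + 1)]
      ring

theorem getNumPos_nonneg (num : Int) (cs : List Int) : 0 ≤ getNumPos num cs := by
  induction cs with
  | nil => simp [getNumPos, getNumPosGo]
  | cons c t ih =>
    simp only [getNumPos, getNumPosGo] at *
    by_cases h : c = num
    · simp [h]
    · simp only [if_neg h]
      rw [getNumPosGo_shift]
      have := getNumPosGo_shift num t 0
      omega

theorem getNumPos_cons (num c : Int) (cs : List Int) :
    getNumPos num (c :: cs) = if c = num then 0 else 1 + getNumPos num cs := by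
  simp only [getNumPos, getNumPosGo]
  by_cases h : c = num
  · simp [h]
  · simp only [if_neg h]
    rw [getNumPosGo_shift]
    omega

theorem foldl_max_acc (f : Int → Int) : ∀ (l : List Int) (a b : Int),
    l.foldl (fun x n => max x (f n)) (max a b) = max a (l.foldl (fun x n => max x (f n)) b) := by
  intro l
  induction l with
  | nil => intro a b; simp
  | cons n t ih =>
    intro a b
    simp only [List.foldl_cons]
    rw [max_assoc, ih]

theorem maxG_cons (n : Int) (t cs : List Int) :
    maxG (n :: t) cs = max (getNumPos n cs) (maxG t cs) := by
  simp only [maxG, List.foldl_cons]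
  rw [show max 0 (getNumPos n cs) = max (getNumPos n cs) 0 from max_comm _ _]
  exact foldl_max_acc _ t _ 0

theorem maxG_nonneg (l cs : List Int) : 0 ≤ maxG l cs := by
  induction l with
  | nil => simp [maxG]
  | cons n t ih => rw [maxG_cons]; omega

theorem maxG_nil (l : List Int) : maxG l [] = 0 := by
  induction l with
  | nil => rfl
  | cons n t ih =>
    rw [maxG_cons, ih]
    simp [getNumPos, getNumPosGo]

theorem maxG_all_eq (c : Int) (cs : List Int) : ∀ (l : List Int), (∀ n ∈ l, n = c) →
    maxG l (c :: cs) = 0 := by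
  intro l
  induction l with
  | nil => intro _; rfl
  | cons n t ih =>
    intro h
    rw [maxG_cons, ih (fun m hm => h m (List.mem_cons_of_mem _ hm))]
    have hn : n = c := h n List.mem_cons_self
    rw [hn, getNumPos_cons]
    simp

theorem maxG_filter (c : Int) (cs : List Int) : ∀ (l : List Int),
    l.filter (fun n => n != c) ≠ [] →
    maxG l (c :: cs) = 1 + maxG (l.filter (fun n => n != c)) cs := by
  intro l
  induction l with
  | nil => intro h; simp at h
  | cons n t ih =>
    intro h
    by_cases hn : n = c
    · have hf : (n :: t).filter (fun n => n != c) = t.filter (fun n => n != c) := by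
        simp [hn]
      rw [hf] at h ⊢
      rw [maxG_cons, hn, getNumPos_cons, ih h, if_pos (rfl : c = c)]
      have := maxG_nonneg (t.filter (fun n => n != c)) cs
      omega
    · have hf : (n :: t).filter (fun n => n != c) = n :: t.filter (fun n => n != c) := by
        simp [hn]
      rw [hf, maxG_cons, maxG_cons, getNumPos_cons,
        if_neg (show ¬ c = n from fun hh => hn hh.symm)]
      by_cases ht : t.filter (fun n => n != c) = []
      · have hall : ∀ m ∈ t, m = c := by
          intro m hm
          by_contra hmc
          have : m ∈ t.filter (fun n => n != c) := by
            rw [List.mem_filter]; exact ⟨hm, by simp [hmc]⟩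
          simp [ht] at this
        rw [ht, maxG_all_eq c cs t hall]
        have h1 := getNumPos_nonneg n cs
        have h2 := maxG_nonneg ([] : List Int) cs
        simp only [maxG, List.foldl_nil]
        omega
      · rw [ih ht]
        have := getNumPos_nonneg n cs
        have := maxG_nonneg (t.filter (fun n => n != c)) cs
        omega

theorem rowWinGo_eq_maxG : ∀ (cs l : List Int) (i : Int), l ≠ [] →
    rowWinGo l cs i = i + maxG l cs := by
  intro cs
  induction cs with
  | nil => intro l i _; rw [maxG_nil]; simp [rowWinGo]
  | cons c t ih =>
    intro l i hl
    simp only [rowWinGo]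
    by_cases hf : l.filter (fun n => n != c) = []
    · rw [if_pos hf]
      have hall : ∀ m ∈ l, m = c := by
        intro m hm
        by_contra hmc
        have : m ∈ l.filter (fun n => n != c) := by
          rw [List.mem_filter]; exact ⟨hm, by simp [hmc]⟩
        simp [hf] at this
      rw [maxG_all_eq c t l hall]
      omega
    · rw [if_neg hf, ih _ _ hf, maxG_filter c t l hf]
      omega

-- the per-row values of A and B agree
theorem rowWinPos_eq (row callLine : List Int) :
    rowWinPos row callLine = row.foldl (fun l num =>
      let numPos := getNumPos num callLine
      if numPos > l then numPos else l) 0 := by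
  have hfold : ∀ (l : List Int) (a : Int),
      l.foldl (fun x num =>
        let numPos := getNumPos num callLine
        if numPos > x then numPos else x) a
      = l.foldl (fun x num => max x (getNumPos num callLine)) a := by
    intro l
    induction l with
    | nil => intro a; rfl
    | cons n t iht =>
      intro a
      simp only [List.foldl_cons]
      rw [iht]
      congr 1
      dsimp only
      split <;> omega
  rw [hfold]
  unfold rowWinPos
  by_cases h : row = []
  · simp [h]
  · rw [if_neg h, rowWinGo_eq_maxG callLine row 0 h]
    simp [maxG]

theorem cardWin_eq (card : List (List Int)) (callLine : List Int) :
    getCardWinningPos card callLine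
      = card.foldl (fun cw row =>
          let r := rowWinPos row callLine
          if r < cw then r else cw) (callLine.length : Int) := by
  unfold getCardWinningPos
  generalize (callLine.length : Int) = a
  induction card generalizing a with
  | nil => rfl
  | cons row t ih =>
    simp only [List.foldl_cons]
    rw [rowWinPos_eq row callLine, ih]

-- the two selection folds over the cards agree
theorem foldl_cards_eq (callLine : List Int) : ∀ (cards : List (List (List Int))) (st : Int × Int × Int),
    cards.foldl (fun (st : Int × Int × Int) card =>
      let cardWinPos := getCardWinningPos card callLine
      if cardWinPos > st.2.2 then (st.2.1, st.2.1 + 1, cardWinPos)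
      else (st.1, st.2.1 + 1, st.2.2)) st
    = cards.foldl (fun (st : Int × Int × Int) card =>
      let cardWin := card.foldl (fun cw row =>
        let r := rowWinPos row callLine
        if r < cw then r else cw) (callLine.length : Int)
      if cardWin > st.2.2 then (st.2.1, st.2.1 + 1, cardWin)
      else (st.1, st.2.1 + 1, st.2.2)) st := by
  intro cards
  induction cards with
  | nil => intro st; rfl
  | cons card t ih =>
    intro st
    simp only [List.foldl_cons]
    rw [ih]
    congr 1
    dsimp only
    rw [cardWin_eq]

-- ===== VERDICT (by name: the statement is the Claim_ definition above) =====
theorem getLosingCard_spec : Claim_equal_getLosingCard := by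
  intro cards callLine _
  simp only [Spec_getLosingCard, getLosingCard, getLosingCard_alt, foldl_cards_eq]
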